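-- pv_equiv track=rewrite | github.com/yannmo20/pointnet-implementation | create_data/manyObjects_saveInTwoDifferentFolders_V2.py | invert_interval_bounderies
-- ===== SOURCE A (Python) =====
-- def invert_interval_bounderies(obj_list, base_interval):
--     previous_right_border = base_interval[0]
--     inverted_interval = []
--
--     obj_list.append([base_interval[1], base_interval[1]])
--
--     if not obj_list:
--         return base_interval
--
--     for obj in obj_list:
--         new_border_right = obj[0]
--         new_border_left = previous_right_border
--         previous_right_border = obj[1]
--         inverted_interval.append([new_border_left, new_border_right])
--
--     return inverted_interval
-- ===== SOURCE B (Python) =====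
-- def invert_interval_bounderies(obj_list, base_interval):
--     # Same in-place append mutation as A; A's `if not obj_list` guard is
--     # unreachable after the append, so it is dropped.
--     obj_list.append([base_interval[1], base_interval[1]])
--     # Stage 1: flatten every boundary into one ordered list of cut points.
--     flat = [base_interval[0]]
--     for obj in obj_list:
--         flat.append(obj[0])
--         flat.append(obj[1])
--     # Stage 2: chunk consecutive cut points into disjoint pairs
--     # (the single leftover point, the duplicated base end, is dropped).
--     return pair_up(flat)
--
-- def pair_up(xs):
--     if len(xs) < 2:
--         return []
--     return [[xs[0], xs[1]]] + pair_up(xs[2:])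
-- ===== Notes on version B (the rewrite author's own statement) =====
-- stated objective: alternative
-- what changed: Replaces A's single pass with a carried previous_right_border accumulator (and its unreachable empty-list guard) by two stages: flatten all interval boundaries into one cut-point list, then recursively chunk that list into consecutive disjoint pairs.
import Mathlib
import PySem

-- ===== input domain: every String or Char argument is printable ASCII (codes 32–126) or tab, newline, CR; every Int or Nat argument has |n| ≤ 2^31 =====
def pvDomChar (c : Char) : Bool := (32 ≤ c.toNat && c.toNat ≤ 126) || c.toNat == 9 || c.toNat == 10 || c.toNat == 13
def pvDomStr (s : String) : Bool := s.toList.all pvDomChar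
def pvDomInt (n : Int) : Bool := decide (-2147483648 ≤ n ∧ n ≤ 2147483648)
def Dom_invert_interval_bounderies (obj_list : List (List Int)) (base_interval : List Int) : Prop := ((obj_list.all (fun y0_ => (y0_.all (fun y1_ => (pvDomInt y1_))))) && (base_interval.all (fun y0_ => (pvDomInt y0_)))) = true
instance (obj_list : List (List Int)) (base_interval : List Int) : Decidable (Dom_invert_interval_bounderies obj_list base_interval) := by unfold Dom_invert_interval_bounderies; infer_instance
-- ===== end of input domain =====

-- B replaces A's carried-accumulator single pass by two stages: flatten all
-- boundaries into one cut-point list, then recursively chunk it into pairs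
-- (objective: alternative). Both Pythons mutate obj_list in place (the append);
-- the equivalence proved here is about the RETURN value only.

-- ===== PORT A =====
-- Out-of-range indexing (Python IndexError) is replaced by default 0; exactly
-- those inputs are excluded by Pre_.
def invert_interval_bounderies (obj_list : List (List Int)) (base_interval : List Int) : List (List Int) :=
  let previous_right_border : Int := PySem.List.pyGetD base_interval 0 0
  let b1 : Int := PySem.List.pyGetD base_interval 1 0
  let objs : List (List Int) := obj_list ++ [[b1, b1]]
  -- Python's `if not obj_list: return base_interval` is unreachable after the
  -- append (objs is nonempty) and ill-typed under the convention; ported as [].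
  if objs.isEmpty then []
  else
    (objs.foldl
      (fun (st : Int × List (List Int)) obj =>
        (PySem.List.pyGetD obj 1 0, st.2 ++ [[st.1, PySem.List.pyGetD obj 0 0]]))
      (previous_right_border, ([] : List (List Int)))).2

-- ===== PORT B =====
-- xs[2:] has length len-2 (used only for pair_up's termination).
lemma pv_slice2_len (xs : List Int) : (PySem.List.slice xs (some 2) none).length = xs.length - 2 := by
  rw [show ((2:Int)) = ((2:Nat):Int) by norm_num, PySem.List.slice_from_natCast]
  simp

-- Source B's recursive pair_up helper, step for step.
def pair_up (xs : List Int) : List (List Int) :=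
  if xs.length < 2 then []
  else [[PySem.List.pyGetD xs 0 0, PySem.List.pyGetD xs 1 0]] ++ pair_up (PySem.List.slice xs (some 2) none)
termination_by xs.length
decreasing_by
  rw [pv_slice2_len]
  omega

-- Source B: append the sentinel, flatten all boundaries into flat, then pair_up.
def invert_interval_bounderies_alt (obj_list : List (List Int)) (base_interval : List Int) : List (List Int) :=
  let b1 : Int := PySem.List.pyGetD base_interval 1 0
  let objs : List (List Int) := obj_list ++ [[b1, b1]]
  let flat : List Int :=
    objs.foldl (fun acc obj => acc ++ [PySem.List.pyGetD obj 0 0, PySem.List.pyGetD obj 1 0])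
      [PySem.List.pyGetD base_interval 0 0]
  pair_up flat

-- ===== PRECONDITION & SPEC =====
-- Pre_ excludes exactly the inputs where the Python A raises IndexError:
-- base_interval shorter than 2, or some object shorter than 2.
def Pre_invert_interval_bounderies (obj_list : List (List Int)) (base_interval : List Int) : Prop :=
  2 ≤ base_interval.length ∧ ∀ obj ∈ obj_list, 2 ≤ obj.length
instance (obj_list : List (List Int)) (base_interval : List Int) : Decidable (Pre_invert_interval_bounderies obj_list base_interval) := by unfold Pre_invert_interval_bounderies; infer_instance
def pvWitness_invert_interval_bounderies : List (List Int) × List Int := ([[1, 2]], [0, 5])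

def Spec_invert_interval_bounderies (obj_list : List (List Int)) (base_interval : List Int) (out : List (List Int)) : Prop := out = invert_interval_bounderies_alt obj_list base_interval
instance (obj_list : List (List Int)) (base_interval : List Int) (out : List (List Int)) : Decidable (Spec_invert_interval_bounderies obj_list base_interval out) := by unfold Spec_invert_interval_bounderies; infer_instance

-- ===== CLAIM (what is proved, stated in full; the proofs are below) =====
def Claim_equal_invert_interval_bounderies : Prop := ∀ (obj_list : List (List Int)) (base_interval : List Int), Dom_invert_interval_bounderies obj_list base_interval → Pre_invert_interval_bounderies obj_list base_interval → Spec_invert_interval_bounderies obj_list base_interval (invert_interval_bounderies obj_list base_interval)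

-- ===== LEMMAS AND PROOFS =====

lemma pair_up_single (a : Int) : pair_up [a] = [] := by
  rw [pair_up]; simp

lemma pair_up_cons_cons (a b : Int) (rest : List Int) :
    pair_up (a :: b :: rest) = [a, b] :: pair_up rest := by
  rw [pair_up, if_neg (by simp)]
  rw [show ((2:Int)) = ((2:Nat):Int) by norm_num, PySem.List.slice_from_natCast]
  have h1 : PySem.List.pyGetD (a :: b :: rest) 1 0 = b := by
    simp [PySem.List.pyGetD, PySem.List.pyGet?, PySem.List.pyIdx?]
  simp [h1, PySem.List.pyGetD_zero_cons]

-- The flattening fold emits each object's two boundaries in order.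
lemma pv_flat_fold (objs : List (List Int)) (acc : List Int) :
    objs.foldl (fun acc obj => acc ++ [PySem.List.pyGetD obj 0 0, PySem.List.pyGetD obj 1 0]) acc
    = acc ++ objs.flatMap (fun obj => [PySem.List.pyGetD obj 0 0, PySem.List.pyGetD obj 1 0]) := by
  induction objs generalizing acc with
  | nil => simp
  | cons o rest ih => simp [ih]

-- A's accumulator loop equals pair_up of the cut-point list.
lemma pv_fold_pair (objs : List (List Int)) (prev : Int) (acc : List (List Int)) :
    (objs.foldl
      (fun (st : Int × List (List Int)) obj =>
        (PySem.List.pyGetD obj 1 0, st.2 ++ [[st.1, PySem.List.pyGetD obj 0 0]]))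
      (prev, acc)).2
    = acc ++ pair_up (prev :: objs.flatMap (fun obj => [PySem.List.pyGetD obj 0 0, PySem.List.pyGetD obj 1 0])) := by
  induction objs generalizing prev acc with
  | nil => simp [pair_up_single]
  | cons o rest ih =>
    simp only [List.foldl_cons, List.flatMap_cons]
    rw [ih]
    simp [pair_up_cons_cons]

-- ===== VERDICT (by name: the statement is the Claim_ definition above) =====
theorem invert_interval_bounderies_spec : Claim_equal_invert_interval_bounderies := by
  intro obj_list base_interval _ _
  unfold Spec_invert_interval_bounderies invert_interval_bounderies invert_interval_bounderies_alt
  simp only []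
  rw [pv_flat_fold, pv_fold_pair]
  simp
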